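-- pv_equiv track=rewrite | github.com/gus-maurizio/algo | algo_subsets.py | genSubsetsSizeN
-- ===== SOURCE A (Python) =====
-- def count1bits(n):
--     c = 0
--     i = n
--     while i > 0:
--         # assume i = 0b0100 (4), i - 1 = 3 0b0011 -> i & (i-1) = 0! sets last non 0 bit to 0
--         c += 1
--         i = i & (i-1)
--     return c
--
-- def genSubsetsSizeN(a, N=2):
--     n = len(a)
--     upto = 2 ** n
--     i = 0
--     ss = []
--     while i < upto:
--         if count1bits(i) == N:
--             bits = f'{i:0{n}b}'
--             ss.append([a[j] for j,v in enumerate(bits) if v == '1'])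
--         i += 1
--     return ss
-- ===== SOURCE B (Python) =====
-- def genSubsetsSizeN(a, N=2):
--     # Recursive branch-on-first-element enumeration: emits exactly the subsets
--     # of size N, in A's ascending-bitmask order, without scanning all 2**n masks.
--     def combs(xs, k):
--         if k < 0 or k > len(xs):
--             return []
--         if k == 0:
--             return [[]]
--         rest = xs[1:]
--         return combs(rest, k) + [[xs[0]] + c for c in combs(rest, k - 1)]
--     return combs(list(a), N)
-- ===== Notes on version B (the rewrite author's own statement) =====
-- stated objective: alternative
-- what changed: A scans all 2**n bitmasks and popcounts each; B recursively enumerates only the size-N subsets (skip-or-include the first element), which reproduces A's ascending-bitmask order directly.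
import Mathlib
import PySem

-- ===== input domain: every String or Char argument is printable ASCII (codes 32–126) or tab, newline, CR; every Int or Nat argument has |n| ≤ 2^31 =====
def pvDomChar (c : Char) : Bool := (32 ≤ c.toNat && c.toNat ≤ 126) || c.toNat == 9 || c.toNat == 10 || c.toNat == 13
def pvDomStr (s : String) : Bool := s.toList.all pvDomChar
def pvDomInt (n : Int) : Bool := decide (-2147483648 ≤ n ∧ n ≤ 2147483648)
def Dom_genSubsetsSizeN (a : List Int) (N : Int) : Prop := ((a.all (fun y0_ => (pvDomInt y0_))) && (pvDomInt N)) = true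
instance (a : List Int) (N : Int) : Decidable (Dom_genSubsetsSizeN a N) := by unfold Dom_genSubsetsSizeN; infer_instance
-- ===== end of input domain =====

-- B replaces A's scan of all 2^n bitmasks by a recursive include-or-skip-the-first-element
-- enumeration that only ever builds the size-N subsets, in the same (ascending-bitmask) order.

-- ===== PORT A =====

-- while i > 0: c += 1; i = i & (i-1).  The loop only runs for positive i (A feeds it
-- the nonnegative loop counter), so working on i.toNat with Nat's &&& is exact.
def count1bitsGo (i : Nat) (c : Int) : Int :=
  if 0 < i then count1bitsGo (i &&& (i - 1)) (c + 1) else c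
termination_by i
decreasing_by exact lt_of_le_of_lt Nat.and_le_right (by omega)

def count1bits (n : Int) : Int := count1bitsGo n.toNat 0

-- hand port of the f-string f'{i:0{n}b}' (no PySem primitive): minimal binary digits,
-- most-significant first ('0' for 0), left-padded with '0' to the requested width.
-- Exact for i ≥ 0 and n ≥ 0, which is all A ever formats.
def binRec (i : Nat) : List Char :=
  if i = 0 then [] else binRec (i / 2) ++ [if i % 2 = 1 then '1' else '0']

def pyBinFmt (i : Int) (width : Int) : List Char :=
  let s := if i.toNat = 0 then ['0'] else binRec i.toNat
  List.replicate (width.toNat - s.length) '0' ++ s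

-- [a[j] for j, v in enumerate(bits) if v == '1']  (every reached j is in range, so the
-- defaulted lookup is exact)
def pickRow (a : List Int) (bits : List Char) : List Int :=
  ((PySem.List.enumerate bits).filter (fun p => p.2 == '1')).map
    (fun p => PySem.List.pyGetD a p.1 0)

def genSubsetsSizeN (a : List Int) (N : Int) : List (List Int) :=
  let n : Int := (a.length : Int)
  let upto : Int := ((2 ^ a.length : Nat) : Int)   -- 2 ** n with n = len(a) ≥ 0
  (PySem.List.pyRange 0 upto 1).foldl
    (fun ss i => if count1bits i == N then ss ++ [pickRow a (pyBinFmt i n)] else ss) []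

-- ===== PORT B =====
def combs (xs : List Int) (k : Int) : List (List Int) :=
  if k < 0 ∨ (xs.length : Int) < k then []
  else if k = 0 then [[]]
  else
    match xs with
    | [] => []   -- unreachable: here 0 < k ≤ len xs
    | x :: rest => combs rest k ++ (combs rest (k - 1)).map (fun c => x :: c)
termination_by xs.length
decreasing_by all_goals simp

def genSubsetsSizeN_alt (a : List Int) (N : Int) : List (List Int) := combs a N

-- ===== PRECONDITION & SPEC =====
def Spec_genSubsetsSizeN (a : List Int) (N : Int) (out : List (List Int)) : Prop := out = genSubsetsSizeN_alt a N
instance (a : List Int) (N : Int) (out : List (List Int)) : Decidable (Spec_genSubsetsSizeN a N out) := by unfold Spec_genSubsetsSizeN; infer_instance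

-- ===== CLAIM (what is proved, stated in full; the proofs are below) =====
def Claim_equal_genSubsetsSizeN : Prop := ∀ (a : List Int) (N : Int), Dom_genSubsetsSizeN a N → Spec_genSubsetsSizeN a N (genSubsetsSizeN a N)

-- ===== LEMMAS AND PROOFS =====

-- canonical width-n binary digits of m (MSB first); the value A's f-string produces for m < 2^n
def canon : Nat → Nat → List Char
  | 0, _ => []
  | n + 1, m => (if 2 ^ n ≤ m then '1' else '0') :: canon n (m % 2 ^ n)

-- select the elements of xs whose bit (read left to right) is '1'
def pickE : List Int → List Char → List Int
  | [], _ => []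
  | _, [] => []
  | x :: xs, c :: cs => if c = '1' then x :: pickE xs cs else pickE xs cs

lemma canon_length (n m : Nat) : (canon n m).length = n := by
  induction n generalizing m with
  | zero => rfl
  | succ n ih => simp [canon, ih]

lemma countGo_acc (i : Nat) (c : Int) : count1bitsGo i c = c + count1bitsGo i 0 := by
  induction i using Nat.strong_induction_on generalizing c with
  | _ i ih =>
    by_cases h : 0 < i
    · conv_lhs => rw [count1bitsGo]
      conv_rhs => rw [count1bitsGo]
      rw [if_pos h, if_pos h,
        ih _ (lt_of_le_of_lt Nat.and_le_right (by omega)) (c + 1),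
        ih _ (lt_of_le_of_lt Nat.and_le_right (by omega)) (0 + 1)]
      ring
    · conv_lhs => rw [count1bitsGo]
      conv_rhs => rw [count1bitsGo]
      rw [if_neg h, if_neg h]
      ring

lemma countGo_zero : count1bitsGo 0 0 = 0 := by rw [count1bitsGo]; simp

lemma countGo_pos (m : Nat) (h : 0 < m) :
    count1bitsGo m 0 = count1bitsGo (m &&& (m - 1)) 0 + 1 := by
  rw [count1bitsGo, if_pos h, countGo_acc]; ring

lemma testBit_two_pow_add (n m : Nat) (hm : m < 2 ^ n) (j : Nat) :
    (2 ^ n + m).testBit j = (decide (j = n) || m.testBit j) := by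
  rcases lt_trichotomy j n with h | h | h
  · rw [Nat.testBit_two_pow_add_gt h]
    simp [Nat.ne_of_lt h]
  · subst h
    rw [Nat.testBit_two_pow_add_eq, Nat.testBit_lt_two_pow hm]
    simp
  · have h1 : (2 ^ n + m).testBit j = false := by
      apply Nat.testBit_lt_two_pow
      calc 2 ^ n + m < 2 ^ n + 2 ^ n := by omega
        _ = 2 ^ (n + 1) := by ring
        _ ≤ 2 ^ j := Nat.pow_le_pow_right (by norm_num) (by omega)
    have h2 : m.testBit j = false :=
      Nat.testBit_lt_two_pow (lt_of_lt_of_le hm (Nat.pow_le_pow_right (by norm_num) (by omega)))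
    simp [h1, h2, Nat.ne_of_gt h]

lemma and_pow_sub_one (n : Nat) : 2 ^ n &&& (2 ^ n - 1) = 0 := by
  apply Nat.eq_of_testBit_eq
  intro j
  simp only [Nat.testBit_and, Nat.zero_testBit]
  have h0 : 0 < 2 ^ n := Nat.two_pow_pos n
  rcases eq_or_ne j n with rfl | h
  · rw [Nat.testBit_lt_two_pow (show 2 ^ j - 1 < 2 ^ j by omega)]
    simp
  · simp [Ne.symm h]

lemma and_step (n m : Nat) (h1 : 1 ≤ m) (h2 : m < 2 ^ n) :
    (2 ^ n + m) &&& (2 ^ n + m - 1) = 2 ^ n + (m &&& (m - 1)) := by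
  have hm1 : m - 1 < 2 ^ n := by omega
  have hand : m &&& (m - 1) < 2 ^ n := lt_of_le_of_lt Nat.and_le_right hm1
  have e : 2 ^ n + m - 1 = 2 ^ n + (m - 1) := by omega
  apply Nat.eq_of_testBit_eq
  intro j
  rw [Nat.testBit_and, e, testBit_two_pow_add n m h2 j,
    testBit_two_pow_add n (m - 1) hm1 j, testBit_two_pow_add n _ hand j,
    Nat.testBit_and]
  cases decide (j = n) <;> simp

lemma pc_pow_add (n m : Nat) (hm : m < 2 ^ n) :
    count1bitsGo (2 ^ n + m) 0 = count1bitsGo m 0 + 1 := by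
  induction m using Nat.strong_induction_on with
  | _ m ih =>
    rcases Nat.eq_zero_or_pos m with rfl | hpos
    · rw [countGo_pos (2 ^ n + 0) (by positivity)]
      simp [and_pow_sub_one n, countGo_zero]
    · have hlt : m &&& (m - 1) < m := lt_of_le_of_lt Nat.and_le_right (by omega)
      rw [countGo_pos (2 ^ n + m) (by omega), and_step n m hpos hm,
        ih _ hlt (lt_trans hlt hm), ← countGo_pos m hpos]

-- LSB peel of canon
lemma canon_lsb (n : Nat) : ∀ m, m < 2 ^ (n + 1) →
    canon (n + 1) m = canon n (m / 2) ++ [if m % 2 = 1 then '1' else '0'] := by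
  induction n with
  | zero =>
    intro m hm
    have : m < 2 := by simpa using hm
    interval_cases m <;> rfl
  | succ n ih =>
    intro m hm
    have hp : (0:Nat) < 2 ^ n := by positivity
    have hdiv : m / 2 < 2 ^ (n + 1) := by
      rw [Nat.div_lt_iff_lt_mul (by norm_num)]
      calc m < 2 ^ (n + 2) := hm
        _ = 2 ^ (n + 1) * 2 := by ring
    have hb : 2 ^ (n + 1) ≤ m ↔ 2 ^ n ≤ m / 2 := by
      rw [Nat.le_div_iff_mul_le (by norm_num)]
      constructor <;> intro h <;> omega
    have hmod2 : m % 2 ^ (n + 1) % 2 = m % 2 :=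
      Nat.mod_mod_of_dvd m (dvd_pow_self 2 (by omega))
    have hdivmod : m % 2 ^ (n + 1) / 2 = m / 2 % 2 ^ n := by
      have := Nat.mod_mul_right_div_self m 2 (2 ^ n)
      rwa [show 2 * 2 ^ n = 2 ^ (n + 1) by ring] at this
    show canon (n + 2) m = _
    rw [canon, ih (m % 2 ^ (n + 1)) (Nat.mod_lt _ (by positivity)), hmod2, hdivmod]
    rw [canon]
    by_cases h : 2 ^ (n + 1) ≤ m
    · rw [if_pos h, if_pos (hb.mp h)]
      simp
    · rw [if_neg h, if_neg (fun hc => h (hb.mpr hc))]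
      simp

lemma canon_zero (n : Nat) : canon n 0 = List.replicate n '0' := by
  induction n with
  | zero => rfl
  | succ n ih =>
    rw [canon, Nat.zero_mod, ih, if_neg (by have := Nat.two_pow_pos n; omega), List.replicate_succ]

lemma canon_pos (n : Nat) : ∀ m, 1 ≤ m → m < 2 ^ n →
    canon n m = List.replicate (n - (binRec m).length) '0' ++ binRec m ∧
      (binRec m).length ≤ n := by
  induction n with
  | zero => intro m h1 h2; omega
  | succ n ih =>
    intro m h1 h2
    have hbr : binRec m = binRec (m / 2) ++ [if m % 2 = 1 then '1' else '0'] := by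
      rw [binRec, if_neg (by omega)]
    rcases Nat.lt_or_ge m 2 with h | h
    · have : m = 1 := by omega
      subst this
      have hb1 : binRec 1 = ['1'] := by
        rw [binRec, show (1:Nat) / 2 = 0 from rfl, binRec]
        norm_num
      rw [canon_lsb n 1 h2, hb1]
      refine ⟨?_, by simp⟩
      rw [show (1:Nat) / 2 = 0 from rfl, canon_zero]
      simp
    · have hd1 : 1 ≤ m / 2 := by omega
      have hd2 : m / 2 < 2 ^ n := by
        rw [Nat.div_lt_iff_lt_mul (by norm_num)]
        calc m < 2 ^ (n + 1) := h2
          _ = 2 ^ n * 2 := by ring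
      obtain ⟨he, hl⟩ := ih (m / 2) hd1 hd2
      rw [canon_lsb n m h2, he, hbr]
      refine ⟨?_, by simp; omega⟩
      rw [List.append_assoc]
      have hc : n + 1 - (binRec (m / 2) ++ [if m % 2 = 1 then '1' else '0']).length
          = n - (binRec (m / 2)).length := by
        simp
      rw [hc]

lemma pyBinFmt_eq_canon (n m : Nat) (hn : 1 ≤ n) (hm : m < 2 ^ n) :
    pyBinFmt (m : Int) (n : Int) = canon n m := by
  rcases Nat.eq_zero_or_pos m with rfl | hpos
  · show List.replicate _ '0' ++ _ = _
    simp only [Int.toNat_natCast, if_true, List.length_singleton]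
    rw [canon_zero, show n = (n - 1) + 1 by omega, List.replicate_succ']
    simp
  · obtain ⟨he, hl⟩ := canon_pos n m hpos hm
    show List.replicate _ '0' ++ _ = _
    simp only [Int.toNat_natCast]
    rw [if_neg (by omega), he]

-- the enumerate/filter/map comprehension is pickE, generalized over an already-consumed prefix
lemma pick_gen (bits : List Char) : ∀ (pre suf : List Int), bits.length = suf.length →
    ((PySem.List.enumerate bits ((pre.length : Int))).filter (fun p => p.2 == '1')).map
      (fun p => PySem.List.pyGetD (pre ++ suf) p.1 0) = pickE suf bits := by
  induction bits with
  | nil =>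
    intro pre suf h
    have hs : suf = [] := List.eq_nil_of_length_eq_zero (by simpa using h.symm)
    subst hs
    simp [PySem.List.enumerate, pickE]
  | cons c cs ih =>
    intro pre suf h
    match suf with
    | y :: ys =>
      rw [PySem.List.enumerate_cons]
      have hpre : (pre.length : Int) + 1 = ((pre ++ [y]).length : Int) := by
        simp
      have happ : pre ++ y :: ys = (pre ++ [y]) ++ ys := by simp
      have hget : PySem.List.pyGetD (pre ++ y :: ys) (pre.length : Int) 0 = y := by
        rw [PySem.List.pyGetD_natCast]
        rw [List.getD_eq_getElem?_getD, List.getElem?_append_right (le_refl _)]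
        simp
      by_cases hc : c = '1'
      · subst hc
        rw [List.filter_cons_of_pos (by simp), List.map_cons, hget]
        rw [hpre, happ, ih (pre ++ [y]) ys (by simpa using h)]
        simp [pickE]
      · rw [List.filter_cons_of_neg (by simpa using hc)]
        rw [hpre, happ, ih (pre ++ [y]) ys (by simpa using h)]
        simp [pickE, hc]

lemma pickRow_eq_pickE (a : List Int) (bits : List Char) (h : bits.length = a.length) :
    pickRow a bits = pickE a bits := by
  have := pick_gen bits [] a h
  simpa [pickRow] using this

-- pickE through the top bit of canon
lemma pickE_canon_cons (x : Int) (xs : List Int) (m : Nat) (hm : m < 2 ^ (xs.length + 1)) :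
    pickE (x :: xs) (canon (xs.length + 1) m) =
      if 2 ^ xs.length ≤ m then x :: pickE xs (canon xs.length (m - 2 ^ xs.length))
      else pickE xs (canon xs.length m) := by
  rw [canon]
  by_cases h : 2 ^ xs.length ≤ m
  · have : m % 2 ^ xs.length = m - 2 ^ xs.length := by
      rw [Nat.mod_eq_sub_mod h, Nat.mod_eq_of_lt (by omega)]
    rw [if_pos h, if_pos h, this, pickE, if_pos rfl]
  · rw [if_neg h, if_neg h, Nat.mod_eq_of_lt (by omega), pickE, if_neg (by decide)]

-- A's computation, normalized: scan the Nat masks below 2^len, keep popcount = N, decode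
def Acore (xs : List Int) (N : Int) : List (List Int) :=
  ((List.range (2 ^ xs.length)).filter (fun m => count1bitsGo m 0 == N)).map
    (fun m => pickE xs (canon xs.length m))

lemma combs_eq_nil (xs : List Int) (N : Int) (h : N < 0 ∨ (xs.length : Int) < N) :
    combs xs N = [] := by
  rw [combs.eq_def]
  rw [if_pos h]

lemma combs_zero (xs : List Int) : combs xs 0 = [[]] := by
  rw [combs.eq_def]
  simp

lemma combs_cons (x : Int) (t : List Int) (N : Int) :
    combs (x :: t) N = combs t N ++ (combs t (N - 1)).map (fun c => x :: c) := by
  by_cases h1 : N < 0 ∨ ((x :: t).length : Int) < N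
  · rw [combs_eq_nil _ _ h1, combs_eq_nil t N (by
      rcases h1 with h | h
      · exact Or.inl h
      · right; simp at h ⊢; omega),
      combs_eq_nil t (N - 1) (by
      rcases h1 with h | h
      · exact Or.inl (by omega)
      · right; simp at h ⊢; omega)]
    simp
  · by_cases h2 : N = 0
    · subst h2
      rw [combs_zero, combs_zero, show (0:Int) - 1 = -1 by norm_num,
        combs_eq_nil t (-1) (Or.inl (by norm_num))]
      simp
    · rw [combs.eq_def, if_neg h1, if_neg h2]

lemma Acore_eq_combs (xs : List Int) : ∀ N : Int, Acore xs N = combs xs N := by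
  induction xs with
  | nil =>
    intro N
    unfold Acore
    rw [show (2:Nat) ^ (([]:List Int)).length = 1 by rfl, List.range_one]
    by_cases h : N = 0
    · subst h
      rw [combs_zero]
      simp [countGo_zero, pickE]
    · rw [combs_eq_nil [] N (by simp; omega)]
      have : (count1bitsGo 0 0 == N) = false := by
        rw [countGo_zero]
        simpa using Ne.symm h
      simp [this]
  | cons x t ih =>
    intro N
    unfold Acore
    have hsplit : List.range (2 ^ (x :: t).length) =
        List.range (2 ^ t.length) ++ (List.range (2 ^ t.length)).map (fun m => 2 ^ t.length + m) := by
      rw [← List.range_add]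
      congr 1
      simp [List.length_cons, pow_succ]
      ring
    rw [hsplit, List.filter_append, List.map_append, combs_cons]
    congr 1
    · -- low masks: top bit clear
      have h1 : ∀ m ∈ List.range (2 ^ t.length),
          pickE (x :: t) (canon (x :: t).length m) = pickE t (canon t.length m) := by
        intro m hm
        rw [List.mem_range] at hm
        rw [List.length_cons, pickE_canon_cons x t m (by
          have : (2:Nat) ^ t.length ≤ 2 ^ (t.length + 1) := Nat.pow_le_pow_right (by norm_num) (by omega)
          omega), if_neg (by omega)]
      rw [List.map_congr_left (fun m hm => h1 m (List.mem_filter.mp hm).1)]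
      exact ih N
    · -- high masks: top bit set
      rw [List.filter_map, List.map_map]
      have hf : ∀ m ∈ List.range (2 ^ t.length),
          ((fun m => count1bitsGo m 0 == N) ∘ (fun m => 2 ^ t.length + m)) m
            = (fun m => count1bitsGo m 0 == N - 1) m := by
        intro m hm
        rw [List.mem_range] at hm
        simp only [Function.comp]
        rw [pc_pow_add t.length m hm]
        rcases eq_or_ne (count1bitsGo m 0) (N - 1) with h | h
        · simp [h]
        · have : count1bitsGo m 0 + 1 ≠ N := by omega
          simp [h, this]
      rw [List.filter_congr hf]
      have h2 : ∀ m ∈ (List.range (2 ^ t.length)).filter (fun m => count1bitsGo m 0 == N - 1),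
          ((fun m => pickE (x :: t) (canon (x :: t).length m)) ∘ (fun m => 2 ^ t.length + m)) m
            = x :: pickE t (canon t.length m) := by
        intro m hm
        have hm' := (List.mem_filter.mp hm).1
        rw [List.mem_range] at hm'
        simp only [Function.comp, List.length_cons]
        rw [pickE_canon_cons x t (2 ^ t.length + m) (by
          have : (2:Nat) ^ (t.length + 1) = 2 ^ t.length + 2 ^ t.length := by ring
          omega), if_pos (by omega)]
        have he : 2 ^ t.length + m - 2 ^ t.length = m := by omega
        rw [he]
      rw [List.map_congr_left h2, ← ih (N - 1)]
      unfold Acore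
      rw [List.map_map]
      rfl

lemma genA_eq_Acore (a : List Int) (N : Int) : genSubsetsSizeN a N = Acore a N := by
  unfold genSubsetsSizeN
  simp only []
  rw [PySem.List.foldl_append_if (fun i => count1bits i == N)
    (fun i => pickRow a (pyBinFmt i (a.length : Int)))]
  rw [PySem.List.pyRange_one, List.filter_map, List.map_map]
  simp only [Int.sub_zero, Int.toNat_natCast, Function.comp_def, zero_add]
  unfold Acore
  have hfil : ∀ m ∈ List.range (2 ^ a.length),
      (count1bits (m : Int) == N) = (count1bitsGo m 0 == N) := by
    intro m _
    simp [count1bits]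
  rw [List.filter_congr hfil]
  rcases List.eq_nil_or_concat' a with rfl | _
  · -- n = 0: the f-string still prints one '0' digit, which selects nothing
    simp [countGo_zero]
    exact fun _ => rfl
  · have hn : 1 ≤ a.length := by
      rcases a with _ | _
      · simp_all
      · simp
    have h2 : ∀ m ∈ (List.range (2 ^ a.length)).filter (fun m => count1bitsGo m 0 == N),
        pickRow a (pyBinFmt (m : Int) (a.length : Int)) = pickE a (canon a.length m) := by
      intro m hm
      have hm' := (List.mem_filter.mp hm).1
      rw [List.mem_range] at hm'
      rw [pyBinFmt_eq_canon a.length m hn hm',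
        pickRow_eq_pickE a _ (canon_length a.length m)]
    rw [List.map_congr_left h2, List.nil_append]

-- ===== VERDICT (by name: the statement is the Claim_ definition above) =====
theorem genSubsetsSizeN_spec : Claim_equal_genSubsetsSizeN := by
  intro a N _
  unfold Spec_genSubsetsSizeN genSubsetsSizeN_alt
  rw [genA_eq_Acore, Acore_eq_combs]
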